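-- pv_equiv track=rewrite | github.com/jobyj829/health-check-triage | build_triage_dataset.py | is_specialty_icd
-- ===== SOURCE A (Python) =====
-- SPECIALTY_ICD_PREFIXES = {
--     "Orthopedic": [
--         "M", "S0", "S1", "S2", "S3", "S4", "S5", "S6", "S7", "S8", "S9",
--         "71", "72", "73", "8",
--     ],
--     "Dermatology": [
--         "L", "68", "69", "70",
--     ],
--     "Ophthalmology": [
--         "H0", "H1", "H2", "H3", "H4", "H5",
--         "36", "37",
--     ],
--     "Psychiatry": [
--         "F", "29", "30", "31",
--     ],
--     "ENT": [
--         "H6", "H7", "H8", "H9", "J0", "J3",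
--         "38", "47",
--     ],
-- }
--
-- def is_specialty_icd(code):
--     """Return the specialty name if the ICD code is specialty-appropriate."""
--     if not code or not isinstance(code, str):
--         return None
--     code = code.strip().upper()
--     for specialty, prefixes in SPECIALTY_ICD_PREFIXES.items():
--         for pfx in prefixes:
--             if code.startswith(pfx):
--                 return specialty
--     return None
-- ===== SOURCE B (Python) =====
-- SPECIALTY_ICD_PREFIXES = {
--     "Orthopedic": [
--         "M", "S0", "S1", "S2", "S3", "S4", "S5", "S6", "S7", "S8", "S9",
--         "71", "72", "73", "8",
--     ],
--     "Dermatology": [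
--         "L", "68", "69", "70",
--     ],
--     "Ophthalmology": [
--         "H0", "H1", "H2", "H3", "H4", "H5",
--         "36", "37",
--     ],
--     "Psychiatry": [
--         "F", "29", "30", "31",
--     ],
--     "ENT": [
--         "H6", "H7", "H8", "H9", "J0", "J3",
--         "38", "47",
--     ],
-- }
--
-- # Flat index: prefix -> specialty (every prefix is 1 or 2 chars and belongs
-- # to exactly one specialty, so order of flattening is irrelevant).
-- _PREFIX_TO_SPECIALTY = {
--     pfx: specialty
--     for specialty, prefixes in SPECIALTY_ICD_PREFIXES.items()
--     for pfx in prefixes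
-- }
--
--
-- def is_specialty_icd(code):
--     """Return the specialty name if the ICD code is specialty-appropriate."""
--     if not code or not isinstance(code, str):
--         return None
--     code = code.strip().upper()
--     return _PREFIX_TO_SPECIALTY.get(code[:1]) or _PREFIX_TO_SPECIALTY.get(code[:2])
-- ===== Notes on version B (the rewrite author's own statement) =====
-- stated objective: idiomatic
-- what changed: Replaces the nested scan over all specialties' prefix lists with a flat prefix->specialty dict built once, looking up only the code's own 1- and 2-character prefixes (input-driven constant-time lookups instead of scanning every prefix with startswith).
import Mathlib
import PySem

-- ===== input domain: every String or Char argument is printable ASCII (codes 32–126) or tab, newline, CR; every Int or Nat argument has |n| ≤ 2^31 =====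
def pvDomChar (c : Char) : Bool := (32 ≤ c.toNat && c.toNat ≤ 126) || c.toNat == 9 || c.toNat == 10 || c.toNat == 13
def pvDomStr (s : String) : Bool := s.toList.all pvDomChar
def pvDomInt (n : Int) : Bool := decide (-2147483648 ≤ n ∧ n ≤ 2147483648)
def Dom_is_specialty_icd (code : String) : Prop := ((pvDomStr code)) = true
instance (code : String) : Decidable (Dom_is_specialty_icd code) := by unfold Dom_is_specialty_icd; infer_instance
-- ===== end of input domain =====

-- B replaces A's nested scan over every specialty's prefix list with a single flat
-- prefix->specialty dict looked up at the code's own 1- and 2-character prefixes (idiomatic).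

-- ===== PORT A =====
-- SPECIALTY_ICD_PREFIXES (prefix strings as char lists)
def pvSpecialtyIcdPrefixes : List (String × List (List Char)) :=
  [("Orthopedic", [['M'], ['S','0'], ['S','1'], ['S','2'], ['S','3'], ['S','4'], ['S','5'],
                   ['S','6'], ['S','7'], ['S','8'], ['S','9'], ['7','1'], ['7','2'], ['7','3'], ['8']]),
   ("Dermatology", [['L'], ['6','8'], ['6','9'], ['7','0']]),
   ("Ophthalmology", [['H','0'], ['H','1'], ['H','2'], ['H','3'], ['H','4'], ['H','5'], ['3','6'], ['3','7']]),
   ("Psychiatry", [['F'], ['2','9'], ['3','0'], ['3','1']]),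
   ("ENT", [['H','6'], ['H','7'], ['H','8'], ['H','9'], ['J','0'], ['J','3'], ['3','8'], ['4','7']])]

-- inner loop: 'for pfx in prefixes: if code.startswith(pfx): return specialty'
def pvScanPrefixes (s : List Char) (specialty : String) : List (List Char) → Option String
  | [] => none
  | p :: ps =>
      if PySem.Chars.startswith s p then some specialty
      else pvScanPrefixes s specialty ps

-- outer loop: 'for specialty, prefixes in SPECIALTY_ICD_PREFIXES.items(): …'
def pvScanSpecialties (s : List Char) : List (String × List (List Char)) → Option String
  | [] => none
  | (specialty, ps) :: rest =>
      match pvScanPrefixes s specialty ps with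
      | some r => some r
      | none => pvScanSpecialties s rest

def is_specialty_icd (code : String) : Option String :=
  if code.toList = [] then none   -- 'not code' ('isinstance(code, str)' is always true here)
  else
    let s := PySem.Chars.upper (PySem.Chars.strip code.toList)
    pvScanSpecialties s pvSpecialtyIcdPrefixes

-- ===== PORT B =====
-- the flattened pairs of _PREFIX_TO_SPECIALTY, in comprehension order
def pvKV : List (List Char × String) :=
  [(['M'], "Orthopedic"), (['S','0'], "Orthopedic"), (['S','1'], "Orthopedic"),
   (['S','2'], "Orthopedic"), (['S','3'], "Orthopedic"), (['S','4'], "Orthopedic"),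
   (['S','5'], "Orthopedic"), (['S','6'], "Orthopedic"), (['S','7'], "Orthopedic"),
   (['S','8'], "Orthopedic"), (['S','9'], "Orthopedic"), (['7','1'], "Orthopedic"),
   (['7','2'], "Orthopedic"), (['7','3'], "Orthopedic"), (['8'], "Orthopedic"),
   (['L'], "Dermatology"), (['6','8'], "Dermatology"), (['6','9'], "Dermatology"),
   (['7','0'], "Dermatology"),
   (['H','0'], "Ophthalmology"), (['H','1'], "Ophthalmology"), (['H','2'], "Ophthalmology"),
   (['H','3'], "Ophthalmology"), (['H','4'], "Ophthalmology"), (['H','5'], "Ophthalmology"),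
   (['3','6'], "Ophthalmology"), (['3','7'], "Ophthalmology"),
   (['F'], "Psychiatry"), (['2','9'], "Psychiatry"), (['3','0'], "Psychiatry"),
   (['3','1'], "Psychiatry"),
   (['H','6'], "ENT"), (['H','7'], "ENT"), (['H','8'], "ENT"), (['H','9'], "ENT"),
   (['J','0'], "ENT"), (['J','3'], "ENT"), (['3','8'], "ENT"), (['4','7'], "ENT")]

-- _PREFIX_TO_SPECIALTY = { pfx: specialty for specialty, prefixes in … for pfx in prefixes }
def pvPrefixToSpecialty : PySem.Dict (List Char) String := PySem.Dict.ofList pvKV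

def is_specialty_icd_alt (code : String) : Option String :=
  if code.toList = [] then none   -- 'not code' ('isinstance(code, str)' is always true here)
  else
    let s := PySem.Chars.upper (PySem.Chars.strip code.toList)
    -- _PREFIX_TO_SPECIALTY.get(code[:1]) or _PREFIX_TO_SPECIALTY.get(code[:2])
    match pvPrefixToSpecialty.get? (PySem.Chars.slice s none (some 1)) with
    | some r => some r
    | none => pvPrefixToSpecialty.get? (PySem.Chars.slice s none (some 2))

-- ===== PRECONDITION & SPEC =====
def Spec_is_specialty_icd (code : String) (out : Option String) : Prop := out = is_specialty_icd_alt code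
instance (code : String) (out : Option String) : Decidable (Spec_is_specialty_icd code out) := by unfold Spec_is_specialty_icd; infer_instance

-- ===== CLAIM (what is proved, stated in full; the proofs are below) =====
def Claim_equal_is_specialty_icd : Prop := ∀ (code : String), Dom_is_specialty_icd code → Spec_is_specialty_icd code (is_specialty_icd code)

-- ===== LEMMAS AND PROOFS =====

-- the flattened dict, evaluated: the 39 keys are pairwise distinct, so ofList just appends
set_option maxRecDepth 4000 in
theorem pvDictEval : pvPrefixToSpecialty = PySem.Dict.mk pvKV := by decide

-- core: on any stripped/uppercased char list, A's nested prefix scan equals B's two lookups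
set_option maxHeartbeats 2000000 in
set_option maxRecDepth 4000 in
theorem pvScan_eq_lookup (s : List Char) :
    pvScanSpecialties s pvSpecialtyIcdPrefixes =
      (match pvPrefixToSpecialty.get? (PySem.Chars.slice s none (some 1)) with
       | some r => some r
       | none => pvPrefixToSpecialty.get? (PySem.Chars.slice s none (some 2))) := by
  rw [pvDictEval]
  match s with
  | [] => rfl
  | [c] =>
      have e1 : PySem.Chars.slice [c] none (some 1) = [c] := by
        simp only [PySem.Chars.slice_eq_listSlice]; rw [PySem.List.slice_to _ (by decide)]; rfl
      have e2 : PySem.Chars.slice [c] none (some 2) = [c] := by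
        simp only [PySem.Chars.slice_eq_listSlice]; rw [PySem.List.slice_to _ (by decide)]; rfl
      rw [e1, e2]
      by_cases hM : c = 'M'
      · subst hM; rfl
      by_cases h8 : c = '8'
      · subst h8; rfl
      by_cases hL : c = 'L'
      · subst hL; rfl
      by_cases hF : c = 'F'
      · subst hF; rfl
      simp only [pvScanSpecialties, pvScanPrefixes, pvSpecialtyIcdPrefixes, pvKV,
        PySem.Chars.startswith, List.isPrefixOf, PySem.Dict.get?_mk_cons,
        List.cons_beq_cons, List.beq_nil_eq, List.isEmpty_cons,
        Bool.and_false, Bool.and_true, BEq.rfl]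
      simp only [Char.reduceBEq, Char.reduceEq, Bool.false_eq_true, Bool.true_and, Bool.false_and,
        Bool.and_true, Bool.and_false, reduceIte, beq_eq_false_iff_ne.mpr (Ne.symm hM), beq_eq_false_iff_ne.mpr (Ne.symm h8), beq_eq_false_iff_ne.mpr (Ne.symm hL), beq_eq_false_iff_ne.mpr (Ne.symm hF)]
      rfl
  | c :: d :: rest =>
      have e1 : PySem.Chars.slice (c :: d :: rest) none (some 1) = [c] := by
        simp only [PySem.Chars.slice_eq_listSlice]; rw [PySem.List.slice_to _ (by decide)]; rfl
      have e2 : PySem.Chars.slice (c :: d :: rest) none (some 2) = [c, d] := by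
        simp only [PySem.Chars.slice_eq_listSlice]; rw [PySem.List.slice_to _ (by decide)]; rfl
      rw [e1, e2]
      -- case split on the first (and where needed second) character; each resolved case is definitional
      by_cases hM : c = 'M'
      · subst hM; rfl
      by_cases h8 : c = '8'
      · subst h8; rfl
      by_cases hL : c = 'L'
      · subst hL; rfl
      by_cases hF : c = 'F'
      · subst hF; rfl
      by_cases hCS : c = 'S'
      · subst hCS
        by_cases hSd0 : d = '0'
        · subst hSd0; rfl
        by_cases hSd1 : d = '1'
        · subst hSd1; rfl
        by_cases hSd2 : d = '2'
        · subst hSd2; rfl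
        by_cases hSd3 : d = '3'
        · subst hSd3; rfl
        by_cases hSd4 : d = '4'
        · subst hSd4; rfl
        by_cases hSd5 : d = '5'
        · subst hSd5; rfl
        by_cases hSd6 : d = '6'
        · subst hSd6; rfl
        by_cases hSd7 : d = '7'
        · subst hSd7; rfl
        by_cases hSd8 : d = '8'
        · subst hSd8; rfl
        by_cases hSd9 : d = '9'
        · subst hSd9; rfl
        simp only [pvScanSpecialties, pvScanPrefixes, pvSpecialtyIcdPrefixes, pvKV,
        PySem.Chars.startswith, List.isPrefixOf, PySem.Dict.get?_mk_cons,
        List.cons_beq_cons, List.beq_nil_eq, List.isEmpty_cons,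
        Bool.and_false, Bool.and_true, BEq.rfl]
        simp only [Char.reduceBEq, Char.reduceEq, Bool.false_eq_true, Bool.true_and, Bool.false_and, Bool.and_true, Bool.and_false, reduceIte,
          beq_eq_false_iff_ne.mpr (Ne.symm hSd0), beq_eq_false_iff_ne.mpr (Ne.symm hSd1), beq_eq_false_iff_ne.mpr (Ne.symm hSd2), beq_eq_false_iff_ne.mpr (Ne.symm hSd3), beq_eq_false_iff_ne.mpr (Ne.symm hSd4), beq_eq_false_iff_ne.mpr (Ne.symm hSd5), beq_eq_false_iff_ne.mpr (Ne.symm hSd6), beq_eq_false_iff_ne.mpr (Ne.symm hSd7), beq_eq_false_iff_ne.mpr (Ne.symm hSd8), beq_eq_false_iff_ne.mpr (Ne.symm hSd9)]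
        rfl
      by_cases hC7 : c = '7'
      · subst hC7
        by_cases h7d1 : d = '1'
        · subst h7d1; rfl
        by_cases h7d2 : d = '2'
        · subst h7d2; rfl
        by_cases h7d3 : d = '3'
        · subst h7d3; rfl
        by_cases h7d0 : d = '0'
        · subst h7d0; rfl
        simp only [pvScanSpecialties, pvScanPrefixes, pvSpecialtyIcdPrefixes, pvKV,
        PySem.Chars.startswith, List.isPrefixOf, PySem.Dict.get?_mk_cons,
        List.cons_beq_cons, List.beq_nil_eq, List.isEmpty_cons,
        Bool.and_false, Bool.and_true, BEq.rfl]
        simp only [Char.reduceBEq, Char.reduceEq, Bool.false_eq_true, Bool.true_and, Bool.false_and, Bool.and_true, Bool.and_false, reduceIte,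
          beq_eq_false_iff_ne.mpr (Ne.symm h7d1), beq_eq_false_iff_ne.mpr (Ne.symm h7d2), beq_eq_false_iff_ne.mpr (Ne.symm h7d3), beq_eq_false_iff_ne.mpr (Ne.symm h7d0)]
        rfl
      by_cases hC6 : c = '6'
      · subst hC6
        by_cases h6d8 : d = '8'
        · subst h6d8; rfl
        by_cases h6d9 : d = '9'
        · subst h6d9; rfl
        simp only [pvScanSpecialties, pvScanPrefixes, pvSpecialtyIcdPrefixes, pvKV,
        PySem.Chars.startswith, List.isPrefixOf, PySem.Dict.get?_mk_cons,
        List.cons_beq_cons, List.beq_nil_eq, List.isEmpty_cons,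
        Bool.and_false, Bool.and_true, BEq.rfl]
        simp only [Char.reduceBEq, Char.reduceEq, Bool.false_eq_true, Bool.true_and, Bool.false_and, Bool.and_true, Bool.and_false, reduceIte,
          beq_eq_false_iff_ne.mpr (Ne.symm h6d8), beq_eq_false_iff_ne.mpr (Ne.symm h6d9)]
        rfl
      by_cases hCH : c = 'H'
      · subst hCH
        by_cases hHd0 : d = '0'
        · subst hHd0; rfl
        by_cases hHd1 : d = '1'
        · subst hHd1; rfl
        by_cases hHd2 : d = '2'
        · subst hHd2; rfl
        by_cases hHd3 : d = '3'
        · subst hHd3; rfl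
        by_cases hHd4 : d = '4'
        · subst hHd4; rfl
        by_cases hHd5 : d = '5'
        · subst hHd5; rfl
        by_cases hHd6 : d = '6'
        · subst hHd6; rfl
        by_cases hHd7 : d = '7'
        · subst hHd7; rfl
        by_cases hHd8 : d = '8'
        · subst hHd8; rfl
        by_cases hHd9 : d = '9'
        · subst hHd9; rfl
        simp only [pvScanSpecialties, pvScanPrefixes, pvSpecialtyIcdPrefixes, pvKV,
        PySem.Chars.startswith, List.isPrefixOf, PySem.Dict.get?_mk_cons,
        List.cons_beq_cons, List.beq_nil_eq, List.isEmpty_cons,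
        Bool.and_false, Bool.and_true, BEq.rfl]
        simp only [Char.reduceBEq, Char.reduceEq, Bool.false_eq_true, Bool.true_and, Bool.false_and, Bool.and_true, Bool.and_false, reduceIte,
          beq_eq_false_iff_ne.mpr (Ne.symm hHd0), beq_eq_false_iff_ne.mpr (Ne.symm hHd1), beq_eq_false_iff_ne.mpr (Ne.symm hHd2), beq_eq_false_iff_ne.mpr (Ne.symm hHd3), beq_eq_false_iff_ne.mpr (Ne.symm hHd4), beq_eq_false_iff_ne.mpr (Ne.symm hHd5), beq_eq_false_iff_ne.mpr (Ne.symm hHd6), beq_eq_false_iff_ne.mpr (Ne.symm hHd7), beq_eq_false_iff_ne.mpr (Ne.symm hHd8), beq_eq_false_iff_ne.mpr (Ne.symm hHd9)]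
        rfl
      by_cases hC3 : c = '3'
      · subst hC3
        by_cases h3d6 : d = '6'
        · subst h3d6; rfl
        by_cases h3d7 : d = '7'
        · subst h3d7; rfl
        by_cases h3d0 : d = '0'
        · subst h3d0; rfl
        by_cases h3d1 : d = '1'
        · subst h3d1; rfl
        by_cases h3d8 : d = '8'
        · subst h3d8; rfl
        simp only [pvScanSpecialties, pvScanPrefixes, pvSpecialtyIcdPrefixes, pvKV,
        PySem.Chars.startswith, List.isPrefixOf, PySem.Dict.get?_mk_cons,
        List.cons_beq_cons, List.beq_nil_eq, List.isEmpty_cons,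
        Bool.and_false, Bool.and_true, BEq.rfl]
        simp only [Char.reduceBEq, Char.reduceEq, Bool.false_eq_true, Bool.true_and, Bool.false_and, Bool.and_true, Bool.and_false, reduceIte,
          beq_eq_false_iff_ne.mpr (Ne.symm h3d6), beq_eq_false_iff_ne.mpr (Ne.symm h3d7), beq_eq_false_iff_ne.mpr (Ne.symm h3d0), beq_eq_false_iff_ne.mpr (Ne.symm h3d1), beq_eq_false_iff_ne.mpr (Ne.symm h3d8)]
        rfl
      by_cases hC2 : c = '2'
      · subst hC2
        by_cases h2d9 : d = '9'
        · subst h2d9; rfl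
        simp only [pvScanSpecialties, pvScanPrefixes, pvSpecialtyIcdPrefixes, pvKV,
        PySem.Chars.startswith, List.isPrefixOf, PySem.Dict.get?_mk_cons,
        List.cons_beq_cons, List.beq_nil_eq, List.isEmpty_cons,
        Bool.and_false, Bool.and_true, BEq.rfl]
        simp only [Char.reduceBEq, Char.reduceEq, Bool.false_eq_true, Bool.true_and, Bool.false_and, Bool.and_true, Bool.and_false, reduceIte,
          beq_eq_false_iff_ne.mpr (Ne.symm h2d9)]
        rfl
      by_cases hCJ : c = 'J'
      · subst hCJ
        by_cases hJd0 : d = '0'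
        · subst hJd0; rfl
        by_cases hJd3 : d = '3'
        · subst hJd3; rfl
        simp only [pvScanSpecialties, pvScanPrefixes, pvSpecialtyIcdPrefixes, pvKV,
        PySem.Chars.startswith, List.isPrefixOf, PySem.Dict.get?_mk_cons,
        List.cons_beq_cons, List.beq_nil_eq, List.isEmpty_cons,
        Bool.and_false, Bool.and_true, BEq.rfl]
        simp only [Char.reduceBEq, Char.reduceEq, Bool.false_eq_true, Bool.true_and, Bool.false_and, Bool.and_true, Bool.and_false, reduceIte,
          beq_eq_false_iff_ne.mpr (Ne.symm hJd0), beq_eq_false_iff_ne.mpr (Ne.symm hJd3)]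
        rfl
      by_cases hC4 : c = '4'
      · subst hC4
        by_cases h4d7 : d = '7'
        · subst h4d7; rfl
        simp only [pvScanSpecialties, pvScanPrefixes, pvSpecialtyIcdPrefixes, pvKV,
        PySem.Chars.startswith, List.isPrefixOf, PySem.Dict.get?_mk_cons,
        List.cons_beq_cons, List.beq_nil_eq, List.isEmpty_cons,
        Bool.and_false, Bool.and_true, BEq.rfl]
        simp only [Char.reduceBEq, Char.reduceEq, Bool.false_eq_true, Bool.true_and, Bool.false_and, Bool.and_true, Bool.and_false, reduceIte,
          beq_eq_false_iff_ne.mpr (Ne.symm h4d7)]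
        rfl
      simp only [pvScanSpecialties, pvScanPrefixes, pvSpecialtyIcdPrefixes, pvKV,
          PySem.Chars.startswith, List.isPrefixOf, PySem.Dict.get?_mk_cons,
          List.cons_beq_cons, List.beq_nil_eq, List.isEmpty_cons,
          Bool.and_false, Bool.and_true, BEq.rfl]
      simp only [Char.reduceBEq, Char.reduceEq, Bool.false_eq_true, Bool.true_and, Bool.false_and, Bool.and_true, Bool.and_false, reduceIte,
        beq_eq_false_iff_ne.mpr (Ne.symm hM), beq_eq_false_iff_ne.mpr (Ne.symm h8), beq_eq_false_iff_ne.mpr (Ne.symm hL), beq_eq_false_iff_ne.mpr (Ne.symm hF), beq_eq_false_iff_ne.mpr (Ne.symm hCS), beq_eq_false_iff_ne.mpr (Ne.symm hC7), beq_eq_false_iff_ne.mpr (Ne.symm hC6), beq_eq_false_iff_ne.mpr (Ne.symm hCH), beq_eq_false_iff_ne.mpr (Ne.symm hC3), beq_eq_false_iff_ne.mpr (Ne.symm hC2), beq_eq_false_iff_ne.mpr (Ne.symm hCJ), beq_eq_false_iff_ne.mpr (Ne.symm hC4)]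
      rfl

-- ===== VERDICT (by name: the statement is the Claim_ definition above) =====
set_option maxRecDepth 4000 in
theorem is_specialty_icd_spec : Claim_equal_is_specialty_icd := by
  intro code _
  unfold Spec_is_specialty_icd is_specialty_icd is_specialty_icd_alt
  by_cases h : code.toList = []
  · simp only [h, if_pos]
  · simp only [h, if_neg, not_false_iff]
    exact pvScan_eq_lookup _
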